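-- pv_equiv track=rewrite | github.com/aleccrowell/CIRC | circ/bootjtk/limma_preprocess.py | deduplicate_rownames
-- ===== SOURCE A (Python) =====
-- def deduplicate_rownames(rownames):
--     """Append -xxx{n} suffixes to duplicate row names, matching R behavior.
--
--     Args:
--         rownames -- list of row-name strings (may contain duplicates)
--
--     Returns:
--         list of unique strings; duplicates get '-xxx1', '-xxx2', ... appended
--     """
--     rownames = list(rownames)
--     counter = 1
--     while len(set(rownames)) < len(rownames):
--         seen: dict = {}
--         new = []
--         for name in rownames:
--             if name in seen:
--                 new.append(f'{name}-xxx{counter}')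
--             else:
--                 seen[name] = True
--                 new.append(name)
--         rownames = new
--         counter += 1
--     return rownames
-- ===== SOURCE B (Python) =====
-- def deduplicate_rownames(rownames):
--     """Append -xxx{n} suffixes to duplicate row names, matching R behavior.
--
--     Worklist version: group indices by name once, then each round touch only
--     the names that are still duplicated instead of rescanning every row.
--     """
--     names = list(rownames)
--     positions = {}
--     for i, n in enumerate(names):
--         positions.setdefault(n, []).append(i)
--     dups = [n for n, idxs in positions.items() if len(idxs) > 1]
--     k = 1
--     while dups:
--         suffix = '-xxx%d' % k
--         # split each duplicated group: its first index keeps the name, the rest move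
--         moves = []  # (suffixed name, moved indices), one entry per duplicated name
--         for name in dups:
--             idxs = positions[name]
--             keep = min(idxs)
--             moves.append((name + suffix, [i for i in idxs if i != keep]))
--             positions[name] = [keep]
--         # apply the moves; only the groups that just grew can still hold duplicates
--         dups = []
--         for new, moved in moves:
--             for i in moved:
--                 names[i] = new
--             grown = positions.get(new, []) + moved
--             positions[new] = grown
--             if len(grown) > 1:
--                 dups.append(new)
--         k += 1
--     return names
-- ===== Notes on version B (the rewrite author's own statement) =====
-- stated objective: faster
-- what changed: Instead of rescanning and rebuilding the whole list with a fresh seen-dict on every deduplication round, B groups row indices by name once and then each round touches only the names that are still duplicated (splitting each group into its kept first index and moved indices, and re-checking only the groups that just grew), so resolution work is proportional to the duplicated entries rather than to the whole list per pass.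
import Mathlib
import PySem

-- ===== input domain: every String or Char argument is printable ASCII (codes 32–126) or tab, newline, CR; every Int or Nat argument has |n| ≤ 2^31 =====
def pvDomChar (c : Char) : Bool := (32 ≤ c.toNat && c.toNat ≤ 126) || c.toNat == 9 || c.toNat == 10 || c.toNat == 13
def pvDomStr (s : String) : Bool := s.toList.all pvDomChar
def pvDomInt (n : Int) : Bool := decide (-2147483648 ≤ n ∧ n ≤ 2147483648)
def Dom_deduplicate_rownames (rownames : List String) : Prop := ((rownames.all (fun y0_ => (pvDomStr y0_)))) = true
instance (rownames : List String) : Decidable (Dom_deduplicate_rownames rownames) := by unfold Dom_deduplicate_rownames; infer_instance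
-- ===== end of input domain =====

-- B replaces A's rescan-the-whole-list-per-round deduplication by a worklist over still-duplicated
-- name groups (objective: faster); both loops carry the same generous fuel guard for totality.


-- fuel: a totality guard shared by both while-loop ports so the proof can run them in lockstep;
-- it only caps the round count and is generous (each round resolves duplicate occurrences)

def pvFuel (rownames : List String) : Nat :=
  (rownames.length + 2) * (rownames.foldl (fun a s => a + s.toList.length) 0 + rownames.length + 2)

-- ===== PORT A =====
-- one round of A's while-body: seen-dict scan rebuilding the whole list
def pvPassA (names : List String) (counter : Int) : List String :=
  (names.foldl
    (fun (st : PySem.Dict String Bool × List String) name =>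
      if st.1.contains name then (st.1, st.2 ++ [name ++ "-xxx" ++ PySem.Int.toStr counter])
      else (st.1.insert name true, st.2 ++ [name]))
    (PySem.Dict.empty, [])).2

def pvLoopA (fuel : Nat) (names : List String) (counter : Int) : List String :=
  match fuel with
  | 0 => names
  | f + 1 =>
    if PySem.Set.len (PySem.Set.ofList names) < names.length then
      pvLoopA f (pvPassA names counter) (counter + 1)
    else names

def deduplicate_rownames (rownames : List String) : List String :=
  pvLoopA (pvFuel rownames) rownames 1

-- ===== PORT B =====
-- '-xxx%d' % k
def pvSuffix (k : Int) : String := "-xxx" ++ PySem.Int.toStr k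

-- min(idxs); the 0 default is unreachable because positions lists are nonempty wherever B reads them
def pvMin (l : List Int) : Int := (PySem.List.min? l (fun i => i)).getD 0

-- first loop of B's round: split each duplicated group (its first index keeps the name, the rest move)
def pvSplit (dups : List String) (positions : PySem.Dict String (List Int)) (suffix : String) :
    List (String × List Int) × PySem.Dict String (List Int) :=
  dups.foldl
    (fun (st : List (String × List Int) × PySem.Dict String (List Int)) name =>
      let idxs := st.2.getD name []
      let keep := pvMin idxs
      (st.1 ++ [(name ++ suffix, idxs.filter (fun i => i != keep))], st.2.insert name [keep]))
    ([], positions)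

-- second loop of B's round: apply the moves; only the groups that just grew can still hold duplicates
def pvApply (moves : List (String × List Int)) (names : List String)
    (positions : PySem.Dict String (List Int)) :
    List String × PySem.Dict String (List Int) × List String :=
  moves.foldl
    (fun (st : List String × PySem.Dict String (List Int) × List String) m =>
      let names' := m.2.foldl (fun ns i => PySem.List.pySetD ns i m.1) st.1
      let grown := st.2.1.getD m.1 [] ++ m.2
      (names', st.2.1.insert m.1 grown, if 1 < grown.length then st.2.2 ++ [m.1] else st.2.2))
    (names, positions, [])

-- the names component evolves on its own

def pvLoopB (fuel : Nat) (names : List String) (positions : PySem.Dict String (List Int))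
    (dups : List String) (k : Int) : List String :=
  match fuel with
  | 0 => names
  | f + 1 =>
    if dups.isEmpty then names
    else
      let sp := pvSplit dups positions (pvSuffix k)
      let ap := pvApply sp.1 names sp.2
      pvLoopB f ap.1 ap.2.1 ap.2.2 (k + 1)

-- positions.setdefault(n, []).append(i) over enumerate(names)
def pvBuildPositions (names : List String) : PySem.Dict String (List Int) :=
  (PySem.List.enumerate names 0).foldl (fun d p => d.modify p.2 [] (· ++ [p.1])) PySem.Dict.empty

def deduplicate_rownames_alt (rownames : List String) : List String :=
  let positions := pvBuildPositions rownames
  let dups := (positions.items.filter (fun p => 1 < p.2.length)).map (·.1)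
  pvLoopB (pvFuel rownames) rownames positions dups 1

-- ===== PRECONDITION & SPEC =====
def Spec_deduplicate_rownames (rownames : List String) (out : List String) : Prop := out = deduplicate_rownames_alt rownames
instance (rownames : List String) (out : List String) : Decidable (Spec_deduplicate_rownames rownames out) := by unfold Spec_deduplicate_rownames; infer_instance

-- ===== CLAIM (what is proved, stated in full; the proofs are below) =====
def Claim_equal_deduplicate_rownames : Prop := ∀ (rownames : List String), Dom_deduplicate_rownames rownames → Spec_deduplicate_rownames rownames (deduplicate_rownames rownames)

-- ===== LEMMAS AND PROOFS =====

def pvGrp (positions : PySem.Dict String (List Int)) (v : String) : List Int := positions.getD v []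

lemma pvBuild_grp (names : List String) (v : String) :
    pvGrp (pvBuildPositions names) v =
      ((PySem.List.enumerate names 0).filter (fun p => p.2 == v)).map (·.1) := by
  unfold pvGrp pvBuildPositions
  have hfold : (PySem.List.enumerate names 0).foldl (fun d p => d.modify p.2 [] (· ++ [p.1])) PySem.Dict.empty
      = ((PySem.List.enumerate names 0).map (fun p => (p.2, p.1))).foldl
          (fun d p => d.modify p.1 [] (· ++ [p.2])) PySem.Dict.empty := by
    rw [List.foldl_map]
  rw [hfold, PySem.Dict.getD_foldl_modify_append]
  simp [PySem.Dict.getD_empty, List.filter_map, Function.comp_def]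

structure pvInv (names : List String) (positions : PySem.Dict String (List Int))
    (dups : List String) : Prop where
  nodupG : ∀ v, (pvGrp positions v).Nodup
  memG : ∀ v (i : Int), i ∈ pvGrp positions v ↔ ∃ j : Nat, j < names.length ∧ i = (j : Int) ∧ names.getD j "" = v
  dupsIff : ∀ v, v ∈ dups ↔ 1 < (pvGrp positions v).length
  nodupD : dups.Nodup

lemma pvBuild_keys_nodup (names : List String) : (pvBuildPositions names).keys.Nodup := by
  unfold pvBuildPositions
  exact PySem.Dict.nodup_keys_foldl_modify_key (PySem.List.enumerate names 0) (·.2) []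
    (fun _ p => (· ++ [p.1])) PySem.Dict.empty (by simp)

lemma pvInv_init (names : List String) :
    pvInv names (pvBuildPositions names)
      (((pvBuildPositions names).items.filter (fun p => 1 < p.2.length)).map (·.1)) := by
  have hgrp := pvBuild_grp names
  constructor
  · intro v
    rw [hgrp v]
    apply List.Nodup.sublist (List.Sublist.map _ List.filter_sublist)
    rw [PySem.List.map_fst_enumerate]
    exact PySem.List.nodup_pyRange_one 0 (0 + names.length) 
  · intro v i
    rw [hgrp v]
    simp only [List.mem_map, List.mem_filter, PySem.List.mem_enumerate_iff]
    constructor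
    · rintro ⟨p, ⟨⟨k, hk, rfl⟩, hv⟩, rfl⟩
      simp at hv
      exact ⟨k, hk, by simp, by simp [hk, hv]⟩
    · rintro ⟨j, hj, rfl, hv⟩
      refine ⟨((j : Int), names[j]), ⟨⟨j, hj, by simp⟩, ?_⟩, rfl⟩
      simp [hj] at hv
      simp [hv]
  · intro v
    simp only [List.mem_map, List.mem_filter]
    have hkeys := pvBuild_keys_nodup names
    constructor
    · rintro ⟨p, ⟨hmem, hlen⟩, rfl⟩
      have : (pvBuildPositions names).get? p.1 = some p.2 :=
        (PySem.Dict.get?_eq_some_iff_mem_items _ _ _ hkeys).mpr (by simpa using hmem)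
      have hg : pvGrp (pvBuildPositions names) p.1 = p.2 := by
        unfold pvGrp
        rw [PySem.Dict.getD_eq_get?_getD, this]; rfl
      rw [hg]; simpa using hlen
    · intro hlen
      cases hg : (pvBuildPositions names).get? v with
      | none =>
        exfalso
        have : pvGrp (pvBuildPositions names) v = [] := by
          unfold pvGrp; rw [PySem.Dict.getD_eq_get?_getD, hg]; rfl
        rw [this] at hlen; simp at hlen
      | some val =>
        have hv : (v, val) ∈ (pvBuildPositions names).items :=
          (PySem.Dict.get?_eq_some_iff_mem_items _ _ _ hkeys).mp hg
        have hgv : pvGrp (pvBuildPositions names) v = val := by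
          unfold pvGrp; rw [PySem.Dict.getD_eq_get?_getD, hg]; rfl
        exact ⟨(v, val), ⟨hv, by simp [← hgv, hlen]⟩, rfl⟩
  · apply List.Nodup.sublist (List.Sublist.map _ List.filter_sublist)
    show ((pvBuildPositions names).items.map (·.1)).Nodup
    exact pvBuild_keys_nodup names

def pvMoved (positions : PySem.Dict String (List Int)) (v : String) : List Int :=
  (pvGrp positions v).filter (fun i => i != pvMin (pvGrp positions v))

lemma pvSplit_go (sfx : String) (dups : List String) :
    ∀ (acc : List (String × List Int)) (p : PySem.Dict String (List Int)), dups.Nodup →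
    (dups.foldl
      (fun (st : List (String × List Int) × PySem.Dict String (List Int)) name =>
        (st.1 ++ [(name ++ sfx, (st.2.getD name []).filter (fun i => i != pvMin (st.2.getD name [])))],
         st.2.insert name [pvMin (st.2.getD name [])]))
      (acc, p)).1 = acc ++ dups.map (fun name => (name ++ sfx, pvMoved p name)) ∧
    ∀ v, pvGrp (dups.foldl
      (fun (st : List (String × List Int) × PySem.Dict String (List Int)) name =>
        (st.1 ++ [(name ++ sfx, (st.2.getD name []).filter (fun i => i != pvMin (st.2.getD name [])))],
         st.2.insert name [pvMin (st.2.getD name [])]))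
      (acc, p)).2 v = if v ∈ dups then [pvMin (pvGrp p v)] else pvGrp p v := by
  induction dups with
  | nil => intro acc p _; simp
  | cons name0 tl ih =>
    intro acc p hnd
    have hn0 : name0 ∉ tl := (List.nodup_cons.mp hnd).1
    have htl : tl.Nodup := (List.nodup_cons.mp hnd).2
    rw [List.foldl_cons]
    set p' : PySem.Dict String (List Int) := p.insert name0 [pvMin (p.getD name0 [])] with hp'
    have hgrp' : ∀ v, v ≠ name0 → pvGrp p' v = pvGrp p v := by
      intro v hv; unfold pvGrp; rw [hp', PySem.Dict.getD_insert_of_ne _ _ _ hv]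
    have hgrp0 : pvGrp p' name0 = [pvMin (pvGrp p name0)] := by
      unfold pvGrp; rw [hp', PySem.Dict.getD_insert_self]
    have hinit : ((acc, p).1 ++ [(name0 ++ sfx, ((acc, p).2.getD name0 []).filter (fun i => i != pvMin ((acc, p).2.getD name0 [])))],
        (acc, p).2.insert name0 [pvMin ((acc, p).2.getD name0 [])])
        = (acc ++ [(name0 ++ sfx, pvMoved p name0)], p') := by
      simp [pvMoved, pvGrp, hp']
    rw [hinit]
    obtain ⟨h1, h2⟩ := ih (acc ++ [(name0 ++ sfx, pvMoved p name0)]) p' htl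
    constructor
    · rw [h1]
      simp only [List.map_cons, List.append_assoc, List.singleton_append]
      congr 1
      congr 1
      apply List.map_congr_left
      intro name hname
      have : pvGrp p' name = pvGrp p name := hgrp' name (fun h => hn0 (h ▸ hname))
      simp [pvMoved, this]
    · intro v
      rw [h2 v]
      by_cases hv0 : v = name0
      · subst hv0
        simp [hn0, hgrp0]
      · by_cases hvt : v ∈ tl
        · simp [hvt, hv0, hgrp' v hv0]
        · simp [hvt, hv0, hgrp' v hv0]

def pvSetAll (moves : List (String × List Int)) (names : List String) : List String :=
  moves.foldl (fun ns m => m.2.foldl (fun ns i => PySem.List.pySetD ns i m.1) ns) names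

lemma pvApply_fst (moves : List (String × List Int)) :
    ∀ (st : List String × PySem.Dict String (List Int) × List String),
    (moves.foldl
      (fun (st : List String × PySem.Dict String (List Int) × List String) m =>
        (m.2.foldl (fun ns i => PySem.List.pySetD ns i m.1) st.1,
         st.2.1.insert m.1 (st.2.1.getD m.1 [] ++ m.2),
         if 1 < (st.2.1.getD m.1 [] ++ m.2).length then st.2.2 ++ [m.1] else st.2.2))
      st).1 = pvSetAll moves st.1 := by
  induction moves with
  | nil => intro st; simp [pvSetAll]
  | cons m tl ih => intro st; rw [List.foldl_cons, ih]; simp [pvSetAll]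

lemma pvSetEach_length (l : List Int) (v : String) : ∀ ns : List String,
    (l.foldl (fun ns i => PySem.List.pySetD ns i v) ns).length = ns.length := by
  induction l with
  | nil => intro ns; rfl
  | cons i tl ih => intro ns; rw [List.foldl_cons, ih]; simp

lemma pvSetAll_length (moves : List (String × List Int)) : ∀ ns : List String,
    (pvSetAll moves ns).length = ns.length := by
  induction moves with
  | nil => intro ns; rfl
  | cons m tl ih => intro ns; rw [pvSetAll, List.foldl_cons, ← pvSetAll, ih, pvSetEach_length]

lemma pvSetEach_getD (l : List Int) (v : String) (hnn : ∀ i ∈ l, 0 ≤ i) :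
    ∀ (ns : List String) (j : Nat), j < ns.length →
    (l.foldl (fun ns i => PySem.List.pySetD ns i v) ns).getD j "" =
      if (j : Int) ∈ l then v else ns.getD j "" := by
  induction l with
  | nil => intro ns j _; simp
  | cons i tl ih =>
    intro ns j hj
    rw [List.foldl_cons, PySem.List.pySetD_of_nonneg _ _ (hnn i (by simp))]
    rw [ih (fun x hx => hnn x (by simp [hx])) _ j (by simpa using hj)]
    by_cases hjt : (j : Int) ∈ tl
    · simp [hjt]
    · simp only [hjt, if_false, List.mem_cons]
      by_cases hij : (j : Int) = i
      · have : i.toNat = j := by omega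
        simp [hij, this, List.getD_eq_getElem?_getD, hj]
      · have hne : i.toNat ≠ j := by
          have := hnn i (by simp); omega
        simp [hij, List.getD_eq_getElem?_getD, List.getElem?_set_ne hne]

lemma pvSetAll_getD_of_not_mem (moves : List (String × List Int))
    (hnn : ∀ m ∈ moves, ∀ i ∈ m.2, 0 ≤ i) :
    ∀ (ns : List String) (j : Nat), j < ns.length → (∀ m ∈ moves, (j : Int) ∉ m.2) →
    (pvSetAll moves ns).getD j "" = ns.getD j "" := by
  induction moves with
  | nil => intro ns j hj h; rfl
  | cons m tl ih =>
    intro ns j hj h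
    rw [pvSetAll, List.foldl_cons, ← pvSetAll]
    rw [ih (fun m' hm' => hnn m' (by simp [hm'])) _ j (by rw [pvSetEach_length]; exact hj)
        (fun m' hm' => h m' (by simp [hm']))]
    rw [pvSetEach_getD m.2 m.1 (hnn m (by simp)) ns j hj]
    simp [h m (by simp)]

lemma pvSetAll_getD_of_mem (moves : List (String × List Int))
    (hnn : ∀ m ∈ moves, ∀ i ∈ m.2, 0 ≤ i) :
    ∀ (ns : List String) (j : Nat), j < ns.length →
    ∀ m ∈ moves, (j : Int) ∈ m.2 → (∀ m' ∈ moves, (j : Int) ∈ m'.2 → m' = m) →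
    (pvSetAll moves ns).getD j "" = m.1 := by
  induction moves with
  | nil => intro ns j hj m hm; simp at hm
  | cons m0 tl ih =>
    intro ns j hj m hm hjm huniq
    rw [pvSetAll, List.foldl_cons, ← pvSetAll]
    by_cases htl : ∃ m' ∈ tl, (j : Int) ∈ m'.2
    · obtain ⟨m', hm', hjm'⟩ := htl
      have hm'm : m' = m := huniq m' (by simp [hm']) hjm'
      subst hm'm
      exact ih (fun x hx => hnn x (by simp [hx])) _ j (by rw [pvSetEach_length]; exact hj)
        m' hm' hjm (fun x hx hjx => huniq x (by simp [hx]) hjx)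
    · push Not at htl
      rw [pvSetAll_getD_of_not_mem tl (fun x hx => hnn x (by simp [hx])) _ j
        (by rw [pvSetEach_length]; exact hj) htl]
      have hm0 : m = m0 := by
        rcases List.mem_cons.mp hm with h | h
        · exact h
        · exact absurd hjm (htl m h)
      subst hm0
      rw [pvSetEach_getD m.2 m.1 (hnn m (by simp)) ns j hj]
      simp [hjm]

lemma pvApply_go (moves : List (String × List Int)) :
    ∀ (p : PySem.Dict String (List Int)) (ns : List String) (dacc : List String),
    (moves.map (·.1)).Nodup →
    (∀ v, pvGrp (moves.foldl
      (fun (st : List String × PySem.Dict String (List Int) × List String) m =>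
        (m.2.foldl (fun ns i => PySem.List.pySetD ns i m.1) st.1,
         st.2.1.insert m.1 (st.2.1.getD m.1 [] ++ m.2),
         if 1 < (st.2.1.getD m.1 [] ++ m.2).length then st.2.2 ++ [m.1] else st.2.2))
      (ns, p, dacc)).2.1 v =
        match moves.find? (fun m => m.1 == v) with
        | some m => pvGrp p v ++ m.2
        | none => pvGrp p v) ∧
    (moves.foldl
      (fun (st : List String × PySem.Dict String (List Int) × List String) m =>
        (m.2.foldl (fun ns i => PySem.List.pySetD ns i m.1) st.1,
         st.2.1.insert m.1 (st.2.1.getD m.1 [] ++ m.2),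
         if 1 < (st.2.1.getD m.1 [] ++ m.2).length then st.2.2 ++ [m.1] else st.2.2))
      (ns, p, dacc)).2.2 =
        dacc ++ (moves.filter (fun m => 1 < (pvGrp p m.1 ++ m.2).length)).map (·.1) := by
  induction moves with
  | nil => intro p ns dacc _; exact ⟨fun v => rfl, by simp⟩
  | cons m0 tl ih =>
    intro p ns dacc hnd
    have hm0 : m0.1 ∉ tl.map (·.1) := (List.nodup_cons.mp hnd).1
    have htl : (tl.map (·.1)).Nodup := (List.nodup_cons.mp hnd).2
    rw [List.foldl_cons]
    set p' : PySem.Dict String (List Int) := p.insert m0.1 (p.getD m0.1 [] ++ m0.2) with hp'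
    have hgrp' : ∀ v, v ≠ m0.1 → pvGrp p' v = pvGrp p v := by
      intro v hv; unfold pvGrp; rw [hp', PySem.Dict.getD_insert_of_ne _ _ _ hv]
    have hgrp0 : pvGrp p' m0.1 = pvGrp p m0.1 ++ m0.2 := by
      unfold pvGrp; rw [hp', PySem.Dict.getD_insert_self]
    obtain ⟨h1, h2⟩ := ih p' (m0.2.foldl (fun ns i => PySem.List.pySetD ns i m0.1) ns)
      (if 1 < (p.getD m0.1 [] ++ m0.2).length then dacc ++ [m0.1] else dacc) htl
    constructor
    · intro v
      rw [h1 v]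
      by_cases hv0 : v = m0.1
      · subst hv0
        have hfind_tl : tl.find? (fun m => m.1 == m0.1) = none := by
          rw [List.find?_eq_none]
          intro x hx hbeq
          exact hm0 ((beq_iff_eq.mp hbeq) ▸ List.mem_map_of_mem hx)
        rw [hfind_tl, hgrp0]
        rw [List.find?_cons_of_pos (by simp)]
      · have hne : (m0.1 == v) = false := by
          simp only [beq_eq_false_iff_ne, ne_eq]
          exact fun h => hv0 h.symm
        rw [List.find?_cons_of_neg (by simp [hne])]
        cases hft : tl.find? (fun m => m.1 == v) with
        | none => rw [hgrp' v hv0]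
        | some m => rw [hgrp' v hv0]
    · rw [h2]
      have hfc : tl.filter (fun m => 1 < (pvGrp p' m.1 ++ m.2).length)
          = tl.filter (fun m => 1 < (pvGrp p m.1 ++ m.2).length) := by
        apply List.filter_congr
        intro m hm
        have hne : m.1 ≠ m0.1 := fun h => hm0 (h ▸ List.mem_map_of_mem hm)
        rw [hgrp' m.1 hne]
      rw [hfc]
      by_cases hc : 1 < (pvGrp p m0.1 ++ m0.2).length
      · simp only [pvGrp, List.length_append] at hc
        simp [hc, pvGrp]
      · simp only [pvGrp, List.length_append] at hc
        simp [hc, pvGrp]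

lemma pvInv.mem_g {names positions dups} (H : pvInv names positions dups) {v : String} {i : Int}
    (h : i ∈ pvGrp positions v) :
    0 ≤ i ∧ i.toNat < names.length ∧ names.getD i.toNat "" = v := by
  obtain ⟨j, hj, rfl, hv⟩ := (H.memG v i).mp h
  exact ⟨by omega, by simpa using hj, by simpa using hv⟩

lemma pvInv.g_self {names positions dups} (H : pvInv names positions dups) {j : Nat}
    (hj : j < names.length) : (j : Int) ∈ pvGrp positions (names.getD j "") :=
  (H.memG _ _).mpr ⟨j, hj, rfl, rfl⟩

lemma pvMin_spec {l : List Int} (h : l ≠ []) : pvMin l ∈ l ∧ ∀ i ∈ l, pvMin l ≤ i := by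
  cases hm : PySem.List.min? l (fun i => i) with
  | none => exact absurd ((PySem.List.min?_eq_none_iff l _).mp hm) h
  | some m =>
    have h1 := PySem.List.min?_mem hm
    have h2 := PySem.List.min?_isMin hm
    simp only [pvMin, hm, Option.getD_some]
    exact ⟨h1, h2⟩

lemma pvMoved_mem (positions : PySem.Dict String (List Int)) (v : String) (i : Int) :
    i ∈ pvMoved positions v ↔ i ∈ pvGrp positions v ∧ i ≠ pvMin (pvGrp positions v) := by
  simp [pvMoved, List.mem_filter, bne_iff_ne]

lemma pv_two_mem_lt_length {α : Type} {l : List α} {a b : α} (ha : a ∈ l) (hb : b ∈ l)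
    (hab : a ≠ b) : 1 < l.length := by
  match l with
  | [] => simp at ha
  | [x] => simp_all
  | x :: y :: tl => simp only [List.length_cons]; omega

lemma pv_append_right_cancel {a b s : String} (h : a ++ s = b ++ s) : a = b := by
  apply String.toList_inj.mp
  have := congrArg String.toList h
  simp only [String.toList_append] at this
  exact List.append_cancel_right this

lemma pv_append_suffix_ne {a s : String} (hs : s ≠ "") : a ++ s ≠ a := by
  intro h
  apply hs
  apply String.toList_inj.mp
  have := congrArg String.toList h
  simp only [String.toList_append] at this
  have : a.toList ++ s.toList = a.toList ++ [] := by simpa using this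
  simpa using List.append_cancel_left this

lemma pv_suffix_ne_empty (k : Int) : pvSuffix k ≠ "" := by
  intro h
  have := congrArg String.toList h
  simp only [pvSuffix, String.toList_append] at this
  simp [show ("-xxx" : String).toList = ['-','x','x','x'] from rfl] at this

lemma pvMs_nonneg {names positions dups} (H : pvInv names positions dups) (sfx : String) :
    ∀ m ∈ dups.map (fun w => (w ++ sfx, pvMoved positions w)), ∀ i ∈ m.2, 0 ≤ i := by
  rintro m hm i hi
  obtain ⟨w, hw, rfl⟩ := List.mem_map.mp hm
  exact (H.mem_g ((pvMoved_mem positions w i).mp hi).1).1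

lemma pvTouch_unique {names positions dups} (H : pvInv names positions dups) {sfx : String}
    {j : Nat} :
    ∀ m ∈ dups.map (fun w => (w ++ sfx, pvMoved positions w)), (j : Int) ∈ m.2 →
      m = (names.getD j "" ++ sfx, pvMoved positions (names.getD j "")) := by
  rintro m hm hjm
  obtain ⟨w, hw, rfl⟩ := List.mem_map.mp hm
  have h1 := ((pvMoved_mem positions w ((j : Int))).mp hjm).1
  have h2 := (H.mem_g h1).2.2
  simp only [Int.toNat_natCast] at h2
  rw [h2]

lemma pvNames1_getD {names positions dups} (H : pvInv names positions dups) (sfx : String)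
    {j : Nat} (hj : j < names.length) :
    (pvSetAll (dups.map (fun w => (w ++ sfx, pvMoved positions w))) names).getD j "" =
      if names.getD j "" ∈ dups ∧ (j : Int) ≠ pvMin (pvGrp positions (names.getD j ""))
      then names.getD j "" ++ sfx else names.getD j "" := by
  set v := names.getD j "" with hv
  by_cases hc : v ∈ dups ∧ (j : Int) ≠ pvMin (pvGrp positions v)
  · rw [if_pos hc]
    apply pvSetAll_getD_of_mem _ (pvMs_nonneg H sfx) names j hj
      (v ++ sfx, pvMoved positions v) (List.mem_map_of_mem hc.1)
      ((pvMoved_mem positions v _).mpr ⟨H.g_self hj, hc.2⟩)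
      (pvTouch_unique H)
  · rw [if_neg hc]
    apply pvSetAll_getD_of_not_mem _ (pvMs_nonneg H sfx) names j hj
    intro m hm hjm
    obtain ⟨w, hw, rfl⟩ := List.mem_map.mp hm
    have h1 := (pvMoved_mem positions w ((j : Int))).mp hjm
    have h2 := (H.mem_g h1.1).2.2
    simp only [Int.toNat_natCast] at h2
    have hvw : v = w := hv.trans h2
    refine hc ⟨?_, ?_⟩
    · rw [hvw]; exact hw
    · rw [hvw]; exact h1.2

lemma pvRenameCond {names positions dups} (H : pvInv names positions dups)
    {j : Nat} (hj : j < names.length) :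
    names.getD j "" ∈ names.take j ↔
      names.getD j "" ∈ dups ∧ (j : Int) ≠ pvMin (pvGrp positions (names.getD j "")) := by
  set v := names.getD j "" with hv
  rw [List.mem_take_iff_getElem]
  constructor
  · rintro ⟨j', hj', hjv⟩
    have hj'len : j' < names.length := lt_of_lt_of_le (lt_min_iff.mp hj').2 (le_refl _)
    have hj'j : j' < j := (lt_min_iff.mp hj').1
    have hm' : (j' : Int) ∈ pvGrp positions v := by
      have := H.g_self hj'len
      rwa [List.getD_eq_getElem _ _ hj'len, hjv] at this
    have hmj : (j : Int) ∈ pvGrp positions v := by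
      have := H.g_self hj
      rwa [← hv] at this
    have hlt : 1 < (pvGrp positions v).length :=
      pv_two_mem_lt_length hm' hmj (by intro h; simp at h; omega)
    refine ⟨(H.dupsIff v).mpr hlt, ?_⟩
    have hmin := pvMin_spec (l := pvGrp positions v) (by intro h; rw [h] at hmj; simp at hmj)
    have := hmin.2 _ hm'
    intro heq
    rw [← heq] at this
    omega
  · rintro ⟨hd, hne⟩
    have hmj : (j : Int) ∈ pvGrp positions v := by
      have := H.g_self hj
      rwa [← hv] at this
    have hmin := pvMin_spec (l := pvGrp positions v) (by intro h; rw [h] at hmj; simp at hmj)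
    obtain ⟨j0, hj0, hj0eq, hj0v⟩ := (H.memG v (pvMin (pvGrp positions v))).mp hmin.1
    have hle := hmin.2 _ hmj
    have hj0j : j0 < j := by
      rw [hj0eq] at hne hle
      omega
    exact ⟨j0, by omega, by rwa [List.getD_eq_getElem _ _ hj0] at hj0v⟩

def pvRename (pref rest : List String) (sfx : String) : List String :=
  match rest with
  | [] => []
  | n :: tl => (if n ∈ pref then n ++ sfx else n) :: pvRename (pref ++ [n]) tl sfx

lemma pvRename_length (pref rest : List String) (sfx : String) :
    (pvRename pref rest sfx).length = rest.length := by
  induction rest generalizing pref with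
  | nil => simp [pvRename]
  | cons n tl ih => simp [pvRename, ih]

lemma pvRename_getD (pref rest : List String) (sfx : String) (t : Nat) (ht : t < rest.length) :
    (pvRename pref rest sfx).getD t "" =
      if (rest.getD t "") ∈ (pref ++ rest.take t) then rest.getD t "" ++ sfx
      else rest.getD t "" := by
  induction rest generalizing pref t with
  | nil => simp at ht
  | cons n tl ih =>
    match t with
    | 0 => simp [pvRename]
    | t + 1 =>
      have ht' : t < tl.length := by simpa using ht
      rw [pvRename]
      show (pvRename (pref ++ [n]) tl sfx).getD t "" = _
      rw [ih (pref ++ [n]) t ht']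
      simp [List.append_assoc]

lemma pvPassA_go (c : Int) (rest : List String) : ∀ (pref out : List String) (seen : PySem.Dict String Bool),
    (∀ x, seen.contains x = true ↔ x ∈ pref) →
    (rest.foldl
      (fun (st : PySem.Dict String Bool × List String) name =>
        if st.1.contains name then (st.1, st.2 ++ [name ++ "-xxx" ++ PySem.Int.toStr c])
        else (st.1.insert name true, st.2 ++ [name]))
      (seen, out)).2 = out ++ pvRename pref rest ("-xxx" ++ PySem.Int.toStr c) := by
  induction rest with
  | nil => intro pref out seen h; simp [pvRename]
  | cons n tl ih =>
    intro pref out seen h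
    by_cases hn : n ∈ pref
    · rw [List.foldl_cons, if_pos ((h n).mpr hn)]
      rw [pvRename, if_pos hn, ih (pref ++ [n]) _ seen (fun x => by
        rw [h x]; simp only [List.mem_append, List.mem_singleton]
        exact ⟨fun hx => Or.inl hx, fun hx => hx.elim id (fun e => e ▸ hn)⟩)]
      simp [String.append_assoc]
    · rw [List.foldl_cons, if_neg (by rw [h n]; exact hn)]
      rw [pvRename, if_neg hn, ih (pref ++ [n]) _ (seen.insert n true) (fun x => by
        rw [PySem.Dict.contains_insert, Bool.or_eq_true, beq_iff_eq, h x]; simp [or_comm])]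
      simp

lemma pvPassA_eq_rename (names : List String) (c : Int) :
    pvPassA names c = pvRename [] names ("-xxx" ++ PySem.Int.toStr c) := by
  have := pvPassA_go c names [] [] PySem.Dict.empty (by simp [PySem.Dict.contains_empty])
  simpa [pvPassA] using this

lemma pvNames1_eq_rename {names positions dups} (H : pvInv names positions dups) (sfx : String) :
    pvSetAll (dups.map (fun w => (w ++ sfx, pvMoved positions w))) names = pvRename [] names sfx := by
  apply List.ext_getElem
  · rw [pvSetAll_length, pvRename_length]
  · intro j h1 h2
    have hj : j < names.length := by rwa [pvSetAll_length] at h1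
    rw [← List.getD_eq_getElem _ "" h1, ← List.getD_eq_getElem _ "" h2]
    rw [pvNames1_getD H sfx hj, pvRename_getD [] names sfx j hj]
    rw [List.nil_append]
    by_cases hc : names.getD j "" ∈ dups ∧ (j : Int) ≠ pvMin (pvGrp positions (names.getD j ""))
    · rw [if_pos hc, if_pos ((pvRenameCond H hj).mpr hc)]
    · rw [if_neg hc, if_neg (fun h => hc ((pvRenameCond H hj).mp h))]

lemma pvInv_next {names positions dups} (H : pvInv names positions dups) {sfx : String}
    (hs : sfx ≠ "")
    (names' : List String) (p2 : PySem.Dict String (List Int)) (dups' : List String)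
    (hn : names' = pvSetAll (dups.map (fun w => (w ++ sfx, pvMoved positions w))) names)
    (hp2A : ∀ w ∈ dups, pvGrp p2 (w ++ sfx) =
      (if (w ++ sfx) ∈ dups then [pvMin (pvGrp positions (w ++ sfx))] else pvGrp positions (w ++ sfx))
        ++ pvMoved positions w)
    (hp2B : ∀ v, (∀ w ∈ dups, v ≠ w ++ sfx) → pvGrp p2 v =
      if v ∈ dups then [pvMin (pvGrp positions v)] else pvGrp positions v)
    (hd : ∀ v, v ∈ dups' ↔ ∃ w ∈ dups, v = w ++ sfx ∧ 1 < (pvGrp p2 v).length)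
    (hdnd : dups'.Nodup) :
    pvInv names' p2 dups' := by
  have hlen : names'.length = names.length := by rw [hn, pvSetAll_length]
  have hname' : ∀ j : Nat, j < names.length → names'.getD j "" =
      if names.getD j "" ∈ dups ∧ (j : Int) ≠ pvMin (pvGrp positions (names.getD j ""))
      then names.getD j "" ++ sfx else names.getD j "" := by
    intro j hj; rw [hn]; exact pvNames1_getD H sfx hj
  -- the minimum of a duplicated group stays put
  have hkeep : ∀ v, v ∈ dups → ∀ i : Int, i = pvMin (pvGrp positions v) →
      ∃ j : Nat, j < names.length ∧ i = (j : Int) ∧ names'.getD j "" = v := by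
    intro v hv i hi
    have hne : pvGrp positions v ≠ [] := by
      intro h
      have := (H.dupsIff v).mp hv
      rw [h] at this; simp at this
    have hmin := pvMin_spec hne
    obtain ⟨j, hj, hje, hjv⟩ := (H.memG v _).mp hmin.1
    refine ⟨j, hj, hi ▸ hje, ?_⟩
    rw [hname' j hj, hjv, if_neg (by rintro ⟨_, hne2⟩; exact hne2 hje.symm)]
  -- a moved index ends up named v ++ sfx
  have hmove : ∀ w, w ∈ dups → ∀ i : Int, i ∈ pvMoved positions w →
      ∃ j : Nat, j < names.length ∧ i = (j : Int) ∧ names'.getD j "" = w ++ sfx := by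
    intro w hw i hi
    obtain ⟨hig, hine⟩ := (pvMoved_mem positions w i).mp hi
    obtain ⟨j, hj, hje, hjv⟩ := (H.memG w i).mp hig
    refine ⟨j, hj, hje, ?_⟩
    rw [hname' j hj, hjv, if_pos ⟨hw, by rw [← hje]; exact hine⟩]
  -- an untouched index keeps its name
  have hstay : ∀ v, v ∉ dups → ∀ i : Int, i ∈ pvGrp positions v →
      ∃ j : Nat, j < names.length ∧ i = (j : Int) ∧ names'.getD j "" = v := by
    intro v hv i hi
    obtain ⟨j, hj, hje, hjv⟩ := (H.memG v i).mp hi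
    refine ⟨j, hj, hje, ?_⟩
    rw [hname' j hj, hjv, if_neg (fun h => hv h.1)]
  -- reading names' back: the three possible sources of the value at j
  have hread : ∀ (j : Nat), j < names.length → ∀ v, names'.getD j "" = v →
      (names.getD j "" = v ∧ (v ∉ dups ∨ (j : Int) = pvMin (pvGrp positions v))) ∨
      (∃ w, names.getD j "" = w ∧ w ∈ dups ∧ (j : Int) ≠ pvMin (pvGrp positions w) ∧ v = w ++ sfx) := by
    intro j hj v hv
    rw [hname' j hj] at hv
    by_cases hc : names.getD j "" ∈ dups ∧ (j : Int) ≠ pvMin (pvGrp positions (names.getD j ""))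
    · rw [if_pos hc] at hv
      exact Or.inr ⟨names.getD j "", rfl, hc.1, hc.2, hv.symm⟩
    · rw [if_neg hc] at hv
      left
      refine ⟨hv, ?_⟩
      by_cases hvd : v ∈ dups
      · right
        by_contra hne
        exact hc (hv ▸ ⟨hvd, hne⟩)
      · exact Or.inl hvd
  constructor
  -- nodupG
  · intro v
    by_cases hA : ∃ w ∈ dups, v = w ++ sfx
    · obtain ⟨w, hw, rfl⟩ := hA
      rw [hp2A w hw]
      have hmw : (pvMoved positions w).Nodup := (H.nodupG w).filter _
      have hdisj : ∀ i ∈ (if (w ++ sfx) ∈ dups then [pvMin (pvGrp positions (w ++ sfx))] else pvGrp positions (w ++ sfx)),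
          i ∉ pvMoved positions w := by
        intro i hi him
        have h1 : names.getD i.toNat "" = w ++ sfx := by
          by_cases hvd : (w ++ sfx) ∈ dups
          · rw [if_pos hvd] at hi
            simp only [List.mem_singleton] at hi
            have hne : pvGrp positions (w ++ sfx) ≠ [] := by
              intro h
              have := (H.dupsIff _).mp hvd
              rw [h] at this; simp at this
            exact (H.mem_g (hi ▸ (pvMin_spec hne).1)).2.2
          · rw [if_neg hvd] at hi
            exact (H.mem_g hi).2.2
        have h2 : names.getD i.toNat "" = w := (H.mem_g ((pvMoved_mem positions w i).mp him).1).2.2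
        exact pv_append_suffix_ne hs (by rw [← h1, h2])
      by_cases hvd : (w ++ sfx) ∈ dups
      · rw [if_pos hvd] at hdisj ⊢
        exact List.Nodup.append (by simp) hmw (by intro i hi; exact hdisj i hi)
      · rw [if_neg hvd] at hdisj ⊢
        exact List.Nodup.append (H.nodupG _) hmw (by intro i hi; exact hdisj i hi)
    · rw [hp2B v (by intro w hw he; exact hA ⟨w, hw, he⟩)]
      by_cases hvd : v ∈ dups
      · rw [if_pos hvd]; simp
      · rw [if_neg hvd]; exact H.nodupG v
  -- memG
  · intro v i
    rw [hlen]
    by_cases hA : ∃ w ∈ dups, v = w ++ sfx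
    · obtain ⟨w, hw, rfl⟩ := hA
      rw [hp2A w hw]
      rw [List.mem_append]
      constructor
      · rintro (hi | hi)
        · by_cases hvd : (w ++ sfx) ∈ dups
          · rw [if_pos hvd] at hi
            simp only [List.mem_singleton] at hi
            exact hkeep _ hvd i hi
          · rw [if_neg hvd] at hi
            exact hstay _ hvd i hi
        · exact hmove w hw i hi
      · rintro ⟨j, hj, rfl, hjv⟩
        rcases hread j hj _ hjv with ⟨hjn, hcase⟩ | ⟨w', hjn, hw', hne', heq'⟩
        · left
          have hig : (j : Int) ∈ pvGrp positions (w ++ sfx) := by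
            have := H.g_self hj
            rwa [hjn] at this
          by_cases hvd : (w ++ sfx) ∈ dups
          · rw [if_pos hvd]
            rcases hcase with h | h
            · exact absurd hvd h
            · simp [h]
          · rw [if_neg hvd]
            exact hig
        · right
          have hww : w' = w := pv_append_right_cancel heq'.symm
          subst hww
          apply (pvMoved_mem positions w' _).mpr
          refine ⟨?_, hne'⟩
          have := H.g_self hj
          rwa [hjn] at this
    · rw [hp2B v (by intro w hw he; exact hA ⟨w, hw, he⟩)]
      constructor
      · intro hi
        by_cases hvd : v ∈ dups
        · rw [if_pos hvd] at hi
          simp only [List.mem_singleton] at hi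
          exact hkeep _ hvd i hi
        · rw [if_neg hvd] at hi
          exact hstay _ hvd i hi
      · rintro ⟨j, hj, rfl, hjv⟩
        rcases hread j hj _ hjv with ⟨hjn, hcase⟩ | ⟨w', hjn, hw', hne', heq'⟩
        · have hig : (j : Int) ∈ pvGrp positions v := by
            have := H.g_self hj
            rwa [hjn] at this
          by_cases hvd : v ∈ dups
          · rw [if_pos hvd]
            rcases hcase with h | h
            · exact absurd hvd h
            · simp [h]
          · rw [if_neg hvd]
            exact hig
        · exact absurd ⟨w', hw', heq'⟩ hA
  -- dupsIff
  · intro v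
    rw [hd v]
    constructor
    · rintro ⟨w, hw, rfl, hlt⟩
      exact hlt
    · intro hlt
      by_cases hA : ∃ w ∈ dups, v = w ++ sfx
      · obtain ⟨w, hw, rfl⟩ := hA
        exact ⟨w, hw, rfl, hlt⟩
      · exfalso
        rw [hp2B v (by intro w hw he; exact hA ⟨w, hw, he⟩)] at hlt
        by_cases hvd : v ∈ dups
        · rw [if_pos hvd] at hlt; simp at hlt
        · rw [if_neg hvd] at hlt
          exact hvd ((H.dupsIff v).mpr hlt)
  -- nodupD
  · exact hdnd

lemma pv_cond_iff (names : List String) :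
    PySem.Set.len (PySem.Set.ofList names) < names.length ↔ ¬ names.Nodup := by
  constructor
  · intro h hn
    rw [PySem.Set.ofList_eq_self_of_nodup names hn] at h
    simp [PySem.Set.len] at h
  · intro h
    have hlen : PySem.Set.len (PySem.Set.ofList names) = ((PySem.Set.ofList names).length : Int) := by
      simp [PySem.Set.len]
    rw [hlen]
    have hgoal : (PySem.Set.ofList names).length < names.length → ((PySem.Set.ofList names).length : Int) < (names.length : Int) := by
      intro h; exact_mod_cast h
    apply hgoal
    have hle : (PySem.Set.ofList names).length ≤ names.length := PySem.Set.length_ofList_le names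
    rcases Nat.lt_or_ge (PySem.Set.ofList names).length names.length with hlt | _
    · exact hlt
    · exfalso
      have hcard : (PySem.Set.ofList names).toFinset = names.toFinset := by
        ext a; simp [PySem.Set.mem_ofList]
      have h1 : (PySem.Set.ofList names).toFinset.card = (PySem.Set.ofList names).length :=
        List.toFinset_card_of_nodup (PySem.Set.nodup_ofList names)
      have h2 := congrArg Finset.card hcard
      have hlen : names.toFinset.card = names.length := by omega
      rw [List.card_toFinset] at hlen
      have := (List.Sublist.length_eq (List.dedup_sublist names)).mp hlen
      exact h (this ▸ List.nodup_dedup names)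

lemma pvFind_some {dups : List String} {sfx : String} (positions : PySem.Dict String (List Int)) :
    ∀ w ∈ dups, (dups.map (fun w => (w ++ sfx, pvMoved positions w))).find?
        (fun m => m.1 == w ++ sfx) = some (w ++ sfx, pvMoved positions w) := by
  induction dups with
  | nil => intro w hw; simp at hw
  | cons d tl ih =>
    intro w hw
    by_cases hdw : d = w
    · subst hdw
      rw [List.map_cons, List.find?_cons_of_pos (by simp)]
    · rw [List.map_cons, List.find?_cons_of_neg (by
        intro h
        exact hdw (pv_append_right_cancel (beq_iff_eq.mp h)))]
      exact ih w (by rcases List.mem_cons.mp hw with h | h; exact absurd h.symm hdw; exact h)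

lemma pvFind_none {dups : List String} {sfx : String} (positions : PySem.Dict String (List Int))
    (v : String) (hv : ∀ w ∈ dups, v ≠ w ++ sfx) :
    (dups.map (fun w => (w ++ sfx, pvMoved positions w))).find? (fun m => m.1 == v) = none := by
  rw [List.find?_eq_none]
  rintro m hm hbeq
  obtain ⟨w, hw, rfl⟩ := List.mem_map.mp hm
  exact hv w hw (beq_iff_eq.mp hbeq).symm

lemma pv_dups_nil_iff {names positions dups} (H : pvInv names positions dups) :
    dups = [] ↔ names.Nodup := by
  constructor
  · intro hnil
    by_contra hnd
    rw [List.nodup_iff_getElem?_ne_getElem?] at hnd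
    push Not at hnd
    obtain ⟨i, j, hij, hj, heq⟩ := hnd
    have hi : i < names.length := by omega
    have heq' : names[i] = names[j] := by
      rw [List.getElem?_eq_getElem hi, List.getElem?_eq_getElem hj] at heq
      simpa using heq
    set v := names.getD i "" with hv
    have hvi : names.getD i "" = v := rfl
    have hvj : names.getD j "" = v := by
      rw [List.getD_eq_getElem _ _ hj, ← heq', ← List.getD_eq_getElem _ "" hi]
    have h1 : (i : Int) ∈ pvGrp positions v := by
      have := H.g_self hi; rwa [hvi] at this
    have h2 : (j : Int) ∈ pvGrp positions v := by
      have := H.g_self hj; rwa [hvj] at this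
    have : v ∈ dups := (H.dupsIff v).mpr
      (pv_two_mem_lt_length h1 h2 (by intro h; simp at h; omega))
    rw [hnil] at this
    simp at this
  · intro hnd
    rw [List.eq_nil_iff_forall_not_mem]
    intro v hv
    have hlt := (H.dupsIff v).mp hv
    match hl : pvGrp positions v with
    | [] => rw [hl] at hlt; simp at hlt
    | [a] => rw [hl] at hlt; simp at hlt
    | a :: b :: t =>
      have hnab : a ≠ b := by
        have := H.nodupG v
        rw [hl] at this
        simp only [List.nodup_cons] at this
        exact fun h => this.1 (by rw [h]; exact List.mem_cons_self ..)
      have ha : a ∈ pvGrp positions v := by rw [hl]; simp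
      have hb : b ∈ pvGrp positions v := by rw [hl]; simp
      obtain ⟨ja, hja, rfl, hva⟩ := (H.memG v a).mp ha
      obtain ⟨jb, hjb, rfl, hvb⟩ := (H.memG v b).mp hb
      have hjab : ja ≠ jb := by intro h; exact hnab (by rw [h])
      rw [List.nodup_iff_getElem?_ne_getElem?] at hnd
      rcases Nat.lt_or_ge ja jb with h | h
      · apply hnd ja jb h hjb
        rw [List.getElem?_eq_getElem hja, List.getElem?_eq_getElem hjb]
        rw [List.getD_eq_getElem _ _ hja] at hva
        rw [List.getD_eq_getElem _ _ hjb] at hvb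
        rw [hva, hvb]
      · apply hnd jb ja (by omega) hja
        rw [List.getElem?_eq_getElem hja, List.getElem?_eq_getElem hjb]
        rw [List.getD_eq_getElem _ _ hja] at hva
        rw [List.getD_eq_getElem _ _ hjb] at hvb
        rw [hva, hvb]

lemma pvRound {names : List String} {positions : PySem.Dict String (List Int)}
    {dups : List String} (k : Int) (H : pvInv names positions dups) :
    (pvApply (pvSplit dups positions (pvSuffix k)).1 names (pvSplit dups positions (pvSuffix k)).2).1
        = pvRename [] names (pvSuffix k) ∧
    pvInv (pvApply (pvSplit dups positions (pvSuffix k)).1 names (pvSplit dups positions (pvSuffix k)).2).1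
      (pvApply (pvSplit dups positions (pvSuffix k)).1 names (pvSplit dups positions (pvSuffix k)).2).2.1
      (pvApply (pvSplit dups positions (pvSuffix k)).1 names (pvSplit dups positions (pvSuffix k)).2).2.2 := by
  have hsplit := pvSplit_go (pvSuffix k) dups [] positions H.nodupD
  have hms : (pvSplit dups positions (pvSuffix k)).1
      = dups.map (fun w => (w ++ pvSuffix k, pvMoved positions w)) := by
    have := hsplit.1
    simpa using this
  have hp1 : ∀ v, pvGrp (pvSplit dups positions (pvSuffix k)).2 v =
      if v ∈ dups then [pvMin (pvGrp positions v)] else pvGrp positions v := hsplit.2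
  have hfstmap : ((dups.map (fun w => (w ++ pvSuffix k, pvMoved positions w))).map (·.1))
      = dups.map (· ++ pvSuffix k) := by
    rw [List.map_map]; rfl
  have hfstnd : (((dups.map (fun w => (w ++ pvSuffix k, pvMoved positions w)))).map (·.1)).Nodup := by
    rw [hfstmap]
    exact H.nodupD.map (fun a b h => pv_append_right_cancel h)
  have happly := pvApply_go (dups.map (fun w => (w ++ pvSuffix k, pvMoved positions w)))
    (pvSplit dups positions (pvSuffix k)).2 names [] hfstnd
  have hfst : (pvApply (dups.map (fun w => (w ++ pvSuffix k, pvMoved positions w))) names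
      (pvSplit dups positions (pvSuffix k)).2).1
      = pvSetAll (dups.map (fun w => (w ++ pvSuffix k, pvMoved positions w))) names :=
    pvApply_fst _ (names, (pvSplit dups positions (pvSuffix k)).2, [])
  have happly1 : ∀ v, pvGrp (pvApply (dups.map (fun w => (w ++ pvSuffix k, pvMoved positions w))) names
      (pvSplit dups positions (pvSuffix k)).2).2.1 v =
        match (dups.map (fun w => (w ++ pvSuffix k, pvMoved positions w))).find? (fun m => m.1 == v) with
        | some m => pvGrp (pvSplit dups positions (pvSuffix k)).2 v ++ m.2
        | none => pvGrp (pvSplit dups positions (pvSuffix k)).2 v := happly.1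
  have happly2 : (pvApply (dups.map (fun w => (w ++ pvSuffix k, pvMoved positions w))) names
      (pvSplit dups positions (pvSuffix k)).2).2.2 =
        [] ++ ((dups.map (fun w => (w ++ pvSuffix k, pvMoved positions w))).filter
          (fun m => 1 < (pvGrp (pvSplit dups positions (pvSuffix k)).2 m.1 ++ m.2).length)).map (·.1) := happly.2
  rw [hms]
  have hnames : (pvApply (dups.map (fun w => (w ++ pvSuffix k, pvMoved positions w))) names
      (pvSplit dups positions (pvSuffix k)).2).1 = pvRename [] names (pvSuffix k) := by
    rw [hfst]; exact pvNames1_eq_rename H (pvSuffix k)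
  refine ⟨hnames, ?_⟩
  apply pvInv_next H (pv_suffix_ne_empty k) _ _ _ hfst
  · intro w hw
    rw [happly1 (w ++ pvSuffix k), pvFind_some positions w hw]
    rw [hp1 (w ++ pvSuffix k)]
  · intro v hv
    rw [happly1 v, pvFind_none positions v hv]
    rw [hp1 v]
  · intro v
    rw [happly2, List.nil_append]
    simp only [List.mem_map, List.mem_filter]
    constructor
    · rintro ⟨m, ⟨hm, hc⟩, rfl⟩
      obtain ⟨w, hw, rfl⟩ := hm
      refine ⟨w, hw, rfl, ?_⟩
      rw [happly1 (w ++ pvSuffix k), pvFind_some positions w hw]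
      simpa using hc
    · rintro ⟨w, hw, rfl, hlen⟩
      refine ⟨(w ++ pvSuffix k, pvMoved positions w), ⟨⟨w, hw, rfl⟩, ?_⟩, rfl⟩
      rw [happly1 (w ++ pvSuffix k), pvFind_some positions w hw] at hlen
      simpa using hlen
  · rw [happly2, List.nil_append]
    apply List.Nodup.sublist (List.Sublist.map _ List.filter_sublist)
    exact hfstnd

lemma pvLoops_eq (fuel : Nat) :
    ∀ (names : List String) (positions : PySem.Dict String (List Int)) (dups : List String)
      (k : Int), pvInv names positions dups →
      pvLoopA fuel names k = pvLoopB fuel names positions dups k := by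
  induction fuel with
  | zero => intro names positions dups k _; rfl
  | succ f ih =>
    intro names positions dups k H
    rw [pvLoopA, pvLoopB]
    by_cases hnd : names.Nodup
    · rw [if_neg (fun h => (pv_cond_iff names).mp h hnd)]
      rw [if_pos (by rw [List.isEmpty_iff]; exact (pv_dups_nil_iff H).mpr hnd)]
    · rw [if_pos ((pv_cond_iff names).mpr hnd)]
      rw [if_neg (by
        rw [List.isEmpty_iff]
        intro h
        exact hnd ((pv_dups_nil_iff H).mp h))]
      obtain ⟨h1, h2⟩ := pvRound k H
      have hp : pvPassA names k = (pvApply (pvSplit dups positions (pvSuffix k)).1 names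
          (pvSplit dups positions (pvSuffix k)).2).1 := by
        rw [pvPassA_eq_rename names k, h1]; rfl
      rw [hp]
      exact ih _ _ _ (k + 1) h2

-- ===== VERDICT (by name: the statement is the Claim_ definition above) =====
theorem deduplicate_rownames_spec : Claim_equal_deduplicate_rownames := by
  intro rownames _
  unfold Spec_deduplicate_rownames deduplicate_rownames deduplicate_rownames_alt
  exact pvLoops_eq (pvFuel rownames) rownames _ _ 1 (pvInv_init rownames)
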